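-- pv_equiv track=rewrite | github.com/tonywang0907/CS463-MPs | mp5/rules/rule_capt.py | apply_capt_transformation
-- ===== SOURCE A (Python) =====
-- def apply_capt_transformation(ori_pw, transformation):
--     #ori_pw (string): input password that needs to be transformed
--     #transformation (string): transformation in string
--     #output (list of string): list of passwords that after transformation (all possiblities)
--     #ori_pw = "abcde", transformation = "head\t2", output = [ABcde, AbCde, AbcDe]
--     # ***********************************************************************
--     # ****************************** TODO ***********************************
--     # ***********************************************************************
--
--     #pw1,pw2 (string,string): a pair of input password
--     #output (string): transformation between pw1 and pw2
--     #consider if head char is capt transformed, if tail char is capt transformed, and # of chars that has been capt transformed in total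
--     #example pw1 = abcde, pw2 = AbcDe, transformation = head\t2 (head char is capt transformed, in total 2 chars are capt transformed)
--     #example pw1 = abcdE, pw2 = AbcDe, transformation = head\ttail\t3 (head char and tail chars are capt transformed, in total 3 chars are capt transformed)
--     #example pw1 = abcde, pw2 = abcDe, transformation = 1 (in total 1 chars are capt transformed)
--
--     output = []
--
--     transformed_string = ""
--     components = transformation.split("\t")
--     char_transformed = int(components[-1])
--
--     # found head
--     if "head" in components:
--         char_transformed -= 1
--         # if first char lower make it capitalize
--         if ori_pw[0].islower():
--             transformed_string += ori_pw[0].upper() + ori_pw[1:]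
--         # else change from upper to lower
--         else:
--             transformed_string += ori_pw[0].lower() + ori_pw[1:]
--
--     if "tail" in components:
--         char_transformed -= 1
--         # similar to head
--         if ori_pw[-1].islower():
--             transformed_string += ori_pw[:-1] + ori_pw[-1].upper()
--         else:
--             transformed_string += ori_pw[:-1] + ori_pw[-1].lower()
--
--     # recursion for combination qs
--     def apply_capt_transformation_helper(pw, count, pos):
--         if count == 0:
--             output.append(pw)
--             return
--         # end position len(pw) - 1 bc alreay checked end
--         for i in range(pos, len(pw) - 1):
--             if len(pw) - i < count:
--                 break
--
--             if pw[i].islower():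
--                 apply_capt_transformation_helper(pw[:i] + pw[i].upper() + pw[i+1:], count - 1, i + 1)
--             else:
--                 apply_capt_transformation_helper(pw[:i] + pw[i].lower() + pw[i+1:], count - 1, i + 1)
--
--     # starting position 1 bc already checked head
--     apply_capt_transformation_helper(transformed_string, char_transformed, 1)
--
--     return output
-- ===== SOURCE B (Python) =====
-- import itertools
--
-- def apply_capt_transformation(ori_pw, transformation):
--     components = transformation.split("\t")
--     k = int(components[-1])
--     ts = ""
--     if "head" in components:
--         k -= 1
--         c = ori_pw[0]
--         ts += (c.upper() if c.islower() else c.lower()) + ori_pw[1:]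
--     if "tail" in components:
--         k -= 1
--         c = ori_pw[-1]
--         ts += ori_pw[:-1] + (c.upper() if c.islower() else c.lower())
--     if k < 0:
--         return []
--     output = []
--     for combo in itertools.combinations(range(1, len(ts) - 1), k):
--         chars = list(ts)
--         for i in combo:
--             c = chars[i]
--             chars[i] = c.upper() if c.islower() else c.lower()
--         output.append("".join(chars))
--     return output
-- ===== Notes on version B (the rewrite author's own statement) =====
-- stated objective: alternative
-- what changed: Replaces A's recursive backtracking helper (which rebuilds the string by slicing at every level and appends to a closure-captured output list) with a single loop over itertools.combinations of the flip positions, flipping each chosen position in a char list; a negative remaining count is returned as [] up front instead of falling out of the recursion.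
import Mathlib
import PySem

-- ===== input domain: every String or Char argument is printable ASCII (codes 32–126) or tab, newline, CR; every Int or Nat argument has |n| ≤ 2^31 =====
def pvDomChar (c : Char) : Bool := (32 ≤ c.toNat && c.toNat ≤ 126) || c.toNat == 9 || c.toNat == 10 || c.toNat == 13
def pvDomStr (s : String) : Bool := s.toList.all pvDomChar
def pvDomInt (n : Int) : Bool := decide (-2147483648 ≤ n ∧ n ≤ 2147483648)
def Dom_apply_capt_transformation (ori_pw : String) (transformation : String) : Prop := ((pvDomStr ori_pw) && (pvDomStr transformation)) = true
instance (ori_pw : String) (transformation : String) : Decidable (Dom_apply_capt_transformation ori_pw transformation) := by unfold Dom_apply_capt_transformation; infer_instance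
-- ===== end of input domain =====

-- B re-implements A's recursive backtracking enumeration as a direct loop over itertools.combinations
-- (same outputs in the same order); same return value wherever A returns (A's double-concatenation when
-- both 'head' and 'tail' are present, and its [] on a negative remaining count, are reproduced as-is).

-- `c.islower()` for a single printable-ASCII character (the only chars admitted by Dom_); exact there.
def pvIslower (c : Char) : Bool := decide ('a' ≤ c ∧ c ≤ 'z')

-- ===== PORT A =====
-- pw[:i] + pw[i].upper()/lower() + pw[i+1:]; on every executed path 0 ≤ i < len(pw), where
-- take/drop are exactly Python's nonnegative slices and getD its in-range indexing.
def pvFlipA (pw : List Char) (i : Nat) : List Char :=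
  if pvIslower (pw.getD i ' ') then pw.take i ++ [(pw.getD i ' ').toUpper] ++ pw.drop (i+1)
  else pw.take i ++ [(pw.getD i ' ').toLower] ++ pw.drop (i+1)

theorem pvFlipA_length (pw : List Char) (i : Nat) (h : i < pw.length) : (pvFlipA pw i).length = pw.length := by
  unfold pvFlipA
  split <;> simp <;> omega

-- apply_capt_transformation_helper and its `for i in range(pos, len(pw)-1)` loop with its break.
mutual
def pvHelperA (pw : List Char) (count : Int) (pos : Nat) : List (List Char) :=
  if count = 0 then [pw]
  else pvLoopA pw count pos
termination_by (pw.length - pos, 1)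
decreasing_by
  exact Prod.Lex.right _ (by omega)
def pvLoopA (pw : List Char) (count : Int) (i : Nat) : List (List Char) :=
  if i < pw.length - 1 then
    if (pw.length : Int) - i < count then []
    else pvHelperA (pvFlipA pw i) (count - 1) (i + 1) ++ pvLoopA pw count (i + 1)
  else []
termination_by (pw.length - i, 0)
decreasing_by
  · have hl := pvFlipA_length pw i (by omega); exact Prod.Lex.left _ _ (by omega)
  · exact Prod.Lex.left _ _ (by omega)
end

def apply_capt_transformation (ori_pw : String) (transformation : String) : List String :=
  let cs := ori_pw.toList
  let components := PySem.Chars.splitOn transformation.toList ['\t']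
  -- int(components[-1]); a non-integer last component raises ValueError in Python — excluded by Pre_
  let char_transformed := (PySem.Int.ofChars? (PySem.List.pyGetD components (-1) [])).getD 0
  -- "head" branch; ori_pw[0] raises IndexError on empty ori_pw — excluded by Pre_
  let (ts1, ct1) :=
    if components.contains ['h','e','a','d'] then
      ((if pvIslower (PySem.List.pyGetD cs 0 ' ')
        then [] ++ ([(PySem.List.pyGetD cs 0 ' ').toUpper] ++ cs.drop 1)
        else [] ++ ([(PySem.List.pyGetD cs 0 ' ').toLower] ++ cs.drop 1)), char_transformed - 1)
    else (([] : List Char), char_transformed)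
  -- "tail" branch; ori_pw[-1] raises IndexError on empty ori_pw — excluded by Pre_ (ori_pw[:-1] = dropLast)
  let (ts2, ct2) :=
    if components.contains ['t','a','i','l'] then
      ((if pvIslower (PySem.List.pyGetD cs (-1) ' ')
        then ts1 ++ (cs.dropLast ++ [(PySem.List.pyGetD cs (-1) ' ').toUpper])
        else ts1 ++ (cs.dropLast ++ [(PySem.List.pyGetD cs (-1) ' ').toLower])), ct1 - 1)
    else (ts1, ct1)
  (pvHelperA ts2 ct2 1).map String.ofList

-- ===== PORT B =====
-- itertools.combinations(l, k) in lexicographic order (indices taken from the list l in order).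
def pvCombos (l : List Nat) (k : Nat) : List (List Nat) :=
  match k, l with
  | 0, _ => [[]]
  | _+1, [] => []
  | k+1, x :: xs => (pvCombos xs k).map (fun c => x :: c) ++ pvCombos xs (k+1)

-- one step of B's inner loop: chars[i] = chars[i].upper() if chars[i].islower() else chars[i].lower()
def pvFlipSet (cs : List Char) (i : Nat) : List Char :=
  cs.set i (if pvIslower (cs.getD i ' ') then (cs.getD i ' ').toUpper else (cs.getD i ' ').toLower)

def apply_capt_transformation_alt (ori_pw : String) (transformation : String) : List String :=
  let cs := ori_pw.toList
  let components := PySem.Chars.splitOn transformation.toList ['\t']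
  -- int(components[-1]); a non-integer last component raises ValueError in Python — excluded by Pre_
  let k0 := (PySem.Int.ofChars? (PySem.List.pyGetD components (-1) [])).getD 0
  -- head/tail flips; indexing the empty ori_pw raises IndexError in Python — excluded by Pre_
  let (ts1, k1) :=
    if components.contains ['h','e','a','d'] then
      ((if pvIslower (PySem.List.pyGetD cs 0 ' ')
        then [] ++ ([(PySem.List.pyGetD cs 0 ' ').toUpper] ++ cs.drop 1)
        else [] ++ ([(PySem.List.pyGetD cs 0 ' ').toLower] ++ cs.drop 1)), k0 - 1)
    else (([] : List Char), k0)
  let (ts2, k2) :=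
    if components.contains ['t','a','i','l'] then
      ((if pvIslower (PySem.List.pyGetD cs (-1) ' ')
        then ts1 ++ (cs.dropLast ++ [(PySem.List.pyGetD cs (-1) ' ').toUpper])
        else ts1 ++ (cs.dropLast ++ [(PySem.List.pyGetD cs (-1) ' ').toLower])), k1 - 1)
    else (ts1, k1)
  if k2 < 0 then []
  else
    -- range(1, len(ts)-1) = [1, …, len(ts)-2]; exact for these nonnegative bounds
    (pvCombos (List.range' 1 (ts2.length - 2)) k2.toNat).map
      (fun combo => String.ofList (combo.foldl pvFlipSet ts2))

-- ===== PRECONDITION & SPEC =====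
-- Pre_ excludes exactly the inputs where the Python A raises: a transformation whose last
-- tab-separated component is not int()-parsable (ValueError), and an empty ori_pw together with a
-- 'head' or 'tail' component (IndexError on ori_pw[0] / ori_pw[-1]).
def Pre_apply_capt_transformation (ori_pw : String) (transformation : String) : Prop :=
  PySem.Int.ofChars? (PySem.List.pyGetD (PySem.Chars.splitOn transformation.toList ['\t']) (-1) []) ≠ none ∧
  (((PySem.Chars.splitOn transformation.toList ['\t']).contains ['h','e','a','d'] = true ∨
    (PySem.Chars.splitOn transformation.toList ['\t']).contains ['t','a','i','l'] = true) → ori_pw ≠ "")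
instance (ori_pw : String) (transformation : String) : Decidable (Pre_apply_capt_transformation ori_pw transformation) := by unfold Pre_apply_capt_transformation; infer_instance

def pvWitness_apply_capt_transformation : String × String := ("abcde", "head\t2")

def Spec_apply_capt_transformation (ori_pw : String) (transformation : String) (out : List String) : Prop := out = apply_capt_transformation_alt ori_pw transformation
instance (ori_pw : String) (transformation : String) (out : List String) : Decidable (Spec_apply_capt_transformation ori_pw transformation out) := by unfold Spec_apply_capt_transformation; infer_instance

-- ===== CLAIM (what is proved, stated in full; the proofs are below) =====
def Claim_equal_apply_capt_transformation : Prop := ∀ (ori_pw : String) (transformation : String), Dom_apply_capt_transformation ori_pw transformation → Pre_apply_capt_transformation ori_pw transformation → Spec_apply_capt_transformation ori_pw transformation (apply_capt_transformation ori_pw transformation)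

-- ===== LEMMAS AND PROOFS =====

theorem pvWitness_ok : Dom_apply_capt_transformation pvWitness_apply_capt_transformation.1 pvWitness_apply_capt_transformation.2 ∧ Pre_apply_capt_transformation pvWitness_apply_capt_transformation.1 pvWitness_apply_capt_transformation.2 := by
  constructor <;> decide

theorem pvFlipA_eq_set (pw : List Char) (i : Nat) (h : i < pw.length) : pvFlipA pw i = pvFlipSet pw i := by
  unfold pvFlipA pvFlipSet
  rw [List.set_eq_take_append_cons_drop, if_pos h]
  split <;> simp

theorem pvCombos_of_length_lt (l : List Nat) (k : Nat) (h : l.length < k) : pvCombos l k = [] := by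
  induction l generalizing k with
  | nil => cases k with | zero => omega | succ k => rfl
  | cons x xs ih =>
    cases k with
    | zero => omega
    | succ k =>
      simp only [pvCombos]
      rw [ih k (by simpa using h), ih (k+1) (by simp at h ⊢; omega)]
      rfl

theorem pvLoopA_neg (pw : List Char) (count : Int) (i : Nat) (h : count < 0) : pvLoopA pw count i = [] := by
  rw [pvLoopA]
  split
  · rename_i hi
    split
    · rfl
    · rw [pvHelperA, if_neg (by omega)]
      have hl := pvFlipA_length pw i
      rw [pvLoopA_neg (pvFlipA pw i) (count - 1) (i + 1) (by omega),
          pvLoopA_neg pw count (i + 1) h]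
      rfl
  · rfl
termination_by (pw.length - i, 1)
decreasing_by
  · have hl := pvFlipA_length pw i (by omega); exact Prod.Lex.left _ _ (by omega)
  · exact Prod.Lex.left _ _ (by omega)

mutual
theorem pvHelperA_eq (pw : List Char) (count : Int) (pos : Nat) (h : 0 ≤ count) :
    pvHelperA pw count pos =
      (pvCombos (List.range' pos (pw.length - 1 - pos)) count.toNat).map
        (fun c => c.foldl pvFlipSet pw) := by
  rw [pvHelperA]
  split
  · rename_i h0
    subst h0
    simp [pvCombos]
  · exact pvLoopA_eq pw count pos (by omega)
termination_by (pw.length - pos, 1)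
decreasing_by
  exact Prod.Lex.right _ (by omega)
theorem pvLoopA_eq (pw : List Char) (count : Int) (i : Nat) (h : 1 ≤ count) :
    pvLoopA pw count i =
      (pvCombos (List.range' i (pw.length - 1 - i)) count.toNat).map
        (fun c => c.foldl pvFlipSet pw) := by
  rw [pvLoopA]
  split
  · rename_i hi
    split
    · rename_i hbrk
      rw [pvCombos_of_length_lt _ _ (by simp [List.length_range']; omega)]
      rfl
    · rename_i hbrk
      have hlen : i < pw.length := by omega
      have hfl := pvFlipA_length pw i
      obtain ⟨m, hm⟩ : ∃ m, count.toNat = m + 1 := ⟨count.toNat - 1, by omega⟩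
      have hr : pw.length - 1 - i = (pw.length - 1 - (i + 1)) + 1 := by omega
      rw [hr, List.range'_succ, hm]
      simp only [pvCombos, List.map_append, List.map_map]
      rw [pvHelperA_eq (pvFlipA pw i) (count - 1) (i + 1) (by omega),
          pvLoopA_eq pw count (i + 1) h]
      have hcn : (count - 1).toNat = m := by omega
      rw [hcn, hfl hlen, hm]
      congr 1
      apply List.map_congr_left
      intro c _
      simp [Function.comp, List.foldl_cons, pvFlipA_eq_set pw i hlen]
  · rename_i hi
    have h0 : pw.length - 1 - i = 0 := by omega
    obtain ⟨m, hm⟩ : ∃ m, count.toNat = m + 1 := ⟨count.toNat - 1, by omega⟩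
    rw [h0, hm]
    rfl
termination_by (pw.length - i, 0)
decreasing_by
  · have hl := pvFlipA_length pw i (by omega); exact Prod.Lex.left _ _ (by omega)
  · exact Prod.Lex.left _ _ (by omega)
end

theorem pvMain (ts : List Char) (ct : Int) :
    (pvHelperA ts ct 1).map String.ofList =
      if ct < 0 then []
      else (pvCombos (List.range' 1 (ts.length - 2)) ct.toNat).map
        (fun combo => String.ofList (combo.foldl pvFlipSet ts)) := by
  split
  · rename_i hneg
    rw [pvHelperA, if_neg (by omega), pvLoopA_neg ts ct 1 hneg]
    rfl
  · rename_i hpos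
    rw [pvHelperA_eq ts ct 1 (by omega)]
    have : ts.length - 1 - 1 = ts.length - 2 := by omega
    rw [this, List.map_map]
    rfl

-- ===== VERDICT (by name: the statement is the Claim_ definition above) =====
theorem apply_capt_transformation_spec : Claim_equal_apply_capt_transformation := by
  intro ori_pw transformation _ _
  unfold Spec_apply_capt_transformation apply_capt_transformation apply_capt_transformation_alt
  exact pvMain _ _
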